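-- pv_equiv track=rewrite | github.com/Mehangits/College_Projects | Quin_McCluskey_With_Name.py.py | order_list
-- ===== SOURCE A (Python) =====
-- def count_one(string):
--     count = 0
--     for n in string:
--         if n == '1':
--             count = count + 1
--     return count
--
-- def order_list(binary_list, var):
--     final_list = []
--     new_list = []
--     for n in range(var + 1):
--         for m in binary_list:
--             if count_one(m) == n:
--                 new_list.append(m)
--
--     return new_list
-- ===== SOURCE B (Python) =====
-- def order_list(binary_list, var):
--     # One pass: group strings by their number of '1's in a dict of buckets,
--     # then read the buckets out in increasing count order.
--     buckets = {}
--     for m in binary_list: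
--         c = sum(ch == '1' for ch in m)
--         buckets.setdefault(c, []).append(m)
--     return [m for n in range(var + 1) for m in buckets.get(n, [])]
-- ===== Notes on version B (the rewrite author's own statement) =====
-- stated objective: faster
-- what changed: Instead of scanning the whole list once per count value 0..var, B counts each string's ones once, buckets the strings by count in a dict in a single pass, and concatenates the buckets in count order.
import Mathlib
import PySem

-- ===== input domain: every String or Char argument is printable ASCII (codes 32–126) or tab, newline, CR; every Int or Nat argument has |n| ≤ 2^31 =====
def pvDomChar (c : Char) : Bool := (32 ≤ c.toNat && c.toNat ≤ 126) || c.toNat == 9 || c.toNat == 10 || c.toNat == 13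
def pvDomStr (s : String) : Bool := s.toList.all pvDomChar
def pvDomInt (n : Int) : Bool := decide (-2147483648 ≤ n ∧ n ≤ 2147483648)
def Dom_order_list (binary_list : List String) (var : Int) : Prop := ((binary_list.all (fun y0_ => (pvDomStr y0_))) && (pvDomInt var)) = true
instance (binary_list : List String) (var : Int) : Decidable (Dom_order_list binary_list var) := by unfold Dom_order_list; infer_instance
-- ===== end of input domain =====

-- B replaces A's var+1 full scans of the list by one dict-bucketing pass plus a read-out in count order (faster).


-- ===== PORT A =====
def count_one (string : String) : Int :=
  string.toList.foldl (fun count n => if n == '1' then count + 1 else count) 0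

def order_list (binary_list : List String) (var : Int) : List String :=
  -- `final_list = []` is dead in A; the nested loops build new_list
  (PySem.List.pyRange 0 (var + 1) 1).foldl
    (fun new_list n =>
      binary_list.foldl
        (fun new_list m => if count_one m == n then new_list ++ [m] else new_list)
        new_list)
    []

-- ===== PORT B =====
-- c = sum(ch == '1' for ch in m)
def pvCnt (m : String) : Int :=
  (m.toList.map (fun ch => if ch == '1' then (1 : Int) else 0)).sum

def order_list_alt (binary_list : List String) (var : Int) : List String :=
  -- buckets.setdefault(c, []).append(m)  ≡  buckets[c] = buckets.get(c, []) + [m]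
  let buckets : PySem.Dict Int (List String) :=
    binary_list.foldl (fun d m => d.modify (pvCnt m) [] (· ++ [m])) PySem.Dict.empty
  (PySem.List.pyRange 0 (var + 1) 1).flatMap (fun n => buckets.getD n [])

-- ===== PRECONDITION & SPEC =====
def Spec_order_list (binary_list : List String) (var : Int) (out : List String) : Prop := out = order_list_alt binary_list var
instance (binary_list : List String) (var : Int) (out : List String) : Decidable (Spec_order_list binary_list var out) := by unfold Spec_order_list; infer_instance

-- ===== CLAIM (what is proved, stated in full; the proofs are below) =====
def Claim_equal_order_list : Prop := ∀ (binary_list : List String) (var : Int), Dom_order_list binary_list var → Spec_order_list binary_list var (order_list binary_list var)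

-- ===== LEMMAS AND PROOFS =====

theorem foldl_shift (cs : List Char) (a : Int) :
    cs.foldl (fun count n => if n == '1' then count + 1 else count) a
    = a + cs.foldl (fun count n => if n == '1' then count + 1 else count) 0 := by
  induction cs generalizing a with
  | nil => simp
  | cons c cs ih =>
    simp only [List.foldl_cons]
    by_cases h : (c == '1') = true
    · rw [if_pos h, if_pos h, ih (a+1), ih (0+1)]
      ring
    · rw [if_neg h, if_neg h, ih a]

theorem count_one_eq_pvCnt (m : String) : count_one m = pvCnt m := by
  unfold count_one pvCnt
  induction m.toList with
  | nil => rfl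
  | cons c cs ih =>
    simp only [List.foldl_cons, List.map_cons, List.sum_cons]
    by_cases h : c = '1'
    · simp only [h, if_pos rfl, beq_self_eq_true]
      rw [foldl_shift, ih]; ring
    · simp only [if_neg h, beq_eq_false_iff_ne.mpr h, Bool.false_eq_true, if_false, ih, zero_add]

theorem buckets_getD (binary_list : List String) (n : Int) :
    (binary_list.foldl (fun d m => d.modify (pvCnt m) [] (· ++ [m]))
      (PySem.Dict.empty : PySem.Dict Int (List String))).getD n []
    = binary_list.filter (fun m => pvCnt m == n) := by
  have h := PySem.Dict.getD_foldl_modify_append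
    (l := binary_list.map (fun m => (pvCnt m, m)))
    (d := (PySem.Dict.empty : PySem.Dict Int (List String))) (c := n)
  rw [List.foldl_map] at h
  rw [h, List.filter_map, List.map_map]
  simp [Function.comp_def]

theorem order_list_eq_flatMap (binary_list : List String) (var : Int) :
    order_list binary_list var
    = (PySem.List.pyRange 0 (var + 1) 1).flatMap
        (fun n => binary_list.filter (fun m => count_one m == n)) := by
  unfold order_list
  have hinner : ∀ (acc : List String) (n : Int),
      binary_list.foldl
        (fun new_list m => if count_one m == n then new_list ++ [m] else new_list) acc
      = acc ++ binary_list.filter (fun m => count_one m == n) := by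
    intro acc n
    exact PySem.List.foldl_append_if_eq_filter _ _ _
  calc (PySem.List.pyRange 0 (var + 1) 1).foldl
        (fun new_list n => binary_list.foldl
          (fun new_list m => if count_one m == n then new_list ++ [m] else new_list) new_list) []
      = (PySem.List.pyRange 0 (var + 1) 1).foldl
        (fun acc n => acc ++ binary_list.filter (fun m => count_one m == n)) [] := by
        apply PySem.List.foldl_congr_mem
        intro acc n _
        exact hinner acc n
    _ = [] ++ (PySem.List.pyRange 0 (var + 1) 1).flatMap
          (fun n => binary_list.filter (fun m => count_one m == n)) :=
        PySem.List.foldl_append_eq_flatMap _ _ _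
    _ = _ := by simp

-- ===== VERDICT (by name: the statement is the Claim_ definition above) =====
theorem order_list_spec : Claim_equal_order_list := by
  intro binary_list var _
  unfold Spec_order_list
  rw [order_list_eq_flatMap]
  unfold order_list_alt
  simp only [buckets_getD, count_one_eq_pvCnt]
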